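-- pv_equiv track=rewrite | github.com/Mohan14123/pharma-triage-env | scripts/demo.py | _has_dangerous_interaction
-- ===== SOURCE A (Python) =====
-- DANGEROUS_PAIRS = [
--     {"Warfarin", "Ibuprofen"},
--     {"Sertraline", "Methotrexate"},
--     {"Lisinopril", "Ibuprofen"},
--     {"Ciprofloxacin", "Warfarin"},
--     {"Omeprazole", "Methotrexate"},
--     {"Amlodipine", "Atorvastatin"},
--     {"Carbamazepine", "Warfarin"},
-- ]
--
-- def _has_dangerous_interaction(drug_name, concomitant):
--     """Check if current drugs form a known dangerous pair."""
--     if not concomitant: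
--         return False
--     all_drugs = {drug_name} | set(concomitant)
--     for pair in DANGEROUS_PAIRS:
--         if pair.issubset(all_drugs):
--             return True
--     return False
-- ===== SOURCE B (Python) =====
-- DANGEROUS = {
--     frozenset(("Warfarin", "Ibuprofen")),
--     frozenset(("Sertraline", "Methotrexate")),
--     frozenset(("Lisinopril", "Ibuprofen")),
--     frozenset(("Ciprofloxacin", "Warfarin")),
--     frozenset(("Omeprazole", "Methotrexate")),
--     frozenset(("Amlodipine", "Atorvastatin")),
--     frozenset(("Carbamazepine", "Warfarin")),
-- }
-- VOCAB = {d for pair in DANGEROUS for d in pair}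
--
-- def _has_dangerous_interaction(drug_name, concomitant):
--     """Check if current drugs form a known dangerous pair."""
--     if not concomitant:
--         return False
--     present = list(({drug_name} | set(concomitant)) & VOCAB)
--     for i in range(len(present)):
--         for j in range(i + 1, len(present)):
--             if frozenset((present[i], present[j])) in DANGEROUS:
--                 return True
--     return False
-- ===== Notes on version B (the rewrite author's own statement) =====
-- stated objective: alternative
-- what changed: Instead of scanning the danger table with repeated subset tests against the full drug set, B intersects the present drugs with the table's vocabulary and iterates over the unordered pairs of that small set, testing each by hashed membership in a precomputed set of frozensets.
import Mathlib
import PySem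

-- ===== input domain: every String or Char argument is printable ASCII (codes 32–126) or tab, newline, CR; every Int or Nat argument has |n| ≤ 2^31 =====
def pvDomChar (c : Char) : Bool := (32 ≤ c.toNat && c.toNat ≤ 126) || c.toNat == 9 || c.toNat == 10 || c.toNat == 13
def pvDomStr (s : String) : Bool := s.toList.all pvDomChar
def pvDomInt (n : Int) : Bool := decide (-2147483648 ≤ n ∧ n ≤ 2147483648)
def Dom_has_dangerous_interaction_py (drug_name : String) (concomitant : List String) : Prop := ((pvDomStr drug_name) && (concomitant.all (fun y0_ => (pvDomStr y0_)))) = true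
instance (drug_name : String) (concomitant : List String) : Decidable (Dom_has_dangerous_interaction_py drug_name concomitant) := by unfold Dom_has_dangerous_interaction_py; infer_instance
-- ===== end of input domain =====

-- B replaces A's subset scan of the pair table with iteration over the unordered pairs of
-- present drugs restricted to the table's vocabulary, each tested by membership in a
-- precomputed table of unordered pairs (Python: frozensets); alternative decomposition.

-- ===== PORT A =====
-- DANGEROUS_PAIRS: list of two-element sets (each set = List of its distinct elements)
def pvDangerousPairsA : List (List String) :=
  [["Warfarin", "Ibuprofen"],
   ["Sertraline", "Methotrexate"],
   ["Lisinopril", "Ibuprofen"],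
   ["Ciprofloxacin", "Warfarin"],
   ["Omeprazole", "Methotrexate"],
   ["Amlodipine", "Atorvastatin"],
   ["Carbamazepine", "Warfarin"]]

def has_dangerous_interaction_py (drug_name : String) (concomitant : List String) : Bool :=
  if concomitant = [] then false
  else
    let all_drugs : PySem.Set String := PySem.Set.union (PySem.Set.ofList [drug_name]) concomitant
    pvDangerousPairsA.any (fun pair => PySem.Set.issubset pair all_drugs)

-- ===== PORT B =====
-- DANGEROUS: the table as unordered pairs (frozensets); membership ignores component order
def pvDangerousFS : List (String × String) :=
  [("Warfarin", "Ibuprofen"),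
   ("Sertraline", "Methotrexate"),
   ("Lisinopril", "Ibuprofen"),
   ("Ciprofloxacin", "Warfarin"),
   ("Omeprazole", "Methotrexate"),
   ("Amlodipine", "Atorvastatin"),
   ("Carbamazepine", "Warfarin")]

-- frozenset((x, y)) in DANGEROUS
def pvFrozenMem (x y : String) : Bool :=
  pvDangerousFS.any (fun q => (x == q.1 && y == q.2) || (x == q.2 && y == q.1))

-- VOCAB = {d for pair in DANGEROUS for d in pair}: the distinct drug names of the table.
-- Python builds it by iterating the set DANGEROUS (hash order); only its MEMBERSHIP is
-- consumed below (set intersection), so the order chosen here is immaterial and exact.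
def pvVocab : PySem.Set String :=
  ["Warfarin", "Ibuprofen", "Sertraline", "Methotrexate", "Lisinopril",
   "Ciprofloxacin", "Omeprazole", "Amlodipine", "Atorvastatin", "Carbamazepine"]

-- the index pairs (i, j), i < j, of B's nested loops, as the element pairs they select
def pvCombos2 : List String → List (String × String)
  | [] => []
  | x :: xs => xs.map (fun y => (x, y)) ++ pvCombos2 xs

def has_dangerous_interaction_py_alt (drug_name : String) (concomitant : List String) : Bool :=
  if concomitant = [] then false
  else
    let present : List String :=
      PySem.Set.inter (PySem.Set.union (PySem.Set.ofList [drug_name]) concomitant) pvVocab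
    (pvCombos2 present).any (fun p => pvFrozenMem p.1 p.2)

-- ===== PRECONDITION & SPEC =====
def Spec_has_dangerous_interaction_py (drug_name : String) (concomitant : List String) (out : Bool) : Prop := out = has_dangerous_interaction_py_alt drug_name concomitant
instance (drug_name : String) (concomitant : List String) (out : Bool) : Decidable (Spec_has_dangerous_interaction_py drug_name concomitant out) := by unfold Spec_has_dangerous_interaction_py; infer_instance

-- ===== CLAIM (what is proved, stated in full; the proofs are below) =====
def Claim_equal_has_dangerous_interaction_py : Prop := ∀ (drug_name : String) (concomitant : List String), Dom_has_dangerous_interaction_py drug_name concomitant → Spec_has_dangerous_interaction_py drug_name concomitant (has_dangerous_interaction_py drug_name concomitant)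

-- ===== LEMMAS AND PROOFS =====

-- an unordered pair {a, b} with a ≠ b occurs among pvCombos2 S iff both a and b occur in S
theorem pvKey (a b : String) (hab : a ≠ b) (S : List String) :
    (∃ p ∈ pvCombos2 S, (p.1 = a ∧ p.2 = b) ∨ (p.1 = b ∧ p.2 = a)) ↔ (a ∈ S ∧ b ∈ S) := by
  induction S with
  | nil => simp [pvCombos2]
  | cons x xs ih =>
    simp only [pvCombos2, List.mem_append, List.mem_map, List.mem_cons]
    constructor
    · rintro ⟨p, hp | hp, hval⟩
      · obtain ⟨y, hy, rfl⟩ := hp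
        rcases hval with ⟨rfl, rfl⟩ | ⟨rfl, rfl⟩
        · exact ⟨Or.inl rfl, Or.inr hy⟩
        · exact ⟨Or.inr hy, Or.inl rfl⟩
      · have := ih.mp ⟨p, hp, hval⟩
        exact ⟨Or.inr this.1, Or.inr this.2⟩
    · rintro ⟨ha, hb⟩
      rcases ha with rfl | ha
      · rcases hb with rfl | hb
        · exact absurd rfl hab
        · exact ⟨(a, b), Or.inl ⟨b, hb, rfl⟩, Or.inl ⟨rfl, rfl⟩⟩
      · rcases hb with rfl | hb
        · exact ⟨(b, a), Or.inl ⟨a, ha, rfl⟩, Or.inr ⟨rfl, rfl⟩⟩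
        · obtain ⟨p, hp, hval⟩ := ih.mpr ⟨ha, hb⟩
          exact ⟨p, Or.inr hp, hval⟩

-- B's scan over present-drug pairs finds a table pair iff both its members are present
theorem pvGen (tbl : List (String × String)) (hd : ∀ q ∈ tbl, q.1 ≠ q.2) (S : List String) :
    ((pvCombos2 S).any (fun p => tbl.any (fun q => (p.1 == q.1 && p.2 == q.2) || (p.1 == q.2 && p.2 == q.1))) = true)
      ↔ (∃ q ∈ tbl, q.1 ∈ S ∧ q.2 ∈ S) := by
  induction tbl with
  | nil => simp
  | cons q tbl ih =>
    have hq : q.1 ≠ q.2 := hd q (List.mem_cons_self ..)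
    have ih' := ih (fun r hr => hd r (List.mem_cons_of_mem _ hr))
    simp only [List.any_cons, Bool.or_eq_true, List.any_eq_true, Bool.and_eq_true,
      beq_iff_eq, List.mem_cons] at ih' ⊢
    constructor
    · rintro ⟨p, hp, hval | hval⟩
      · rcases hval with ⟨h1, h2⟩ | ⟨h1, h2⟩
        · exact ⟨q, Or.inl rfl, (pvKey q.1 q.2 hq S).mp ⟨p, hp, Or.inl ⟨h1, h2⟩⟩⟩
        · exact ⟨q, Or.inl rfl, (pvKey q.1 q.2 hq S).mp ⟨p, hp, Or.inr ⟨h1, h2⟩⟩⟩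
      · obtain ⟨r, hr, hv⟩ := ih'.mp ⟨p, hp, hval⟩
        exact ⟨r, Or.inr hr, hv⟩
    · rintro ⟨r, hr | hr, hv⟩
      · subst hr
        obtain ⟨p, hp, hval⟩ := (pvKey r.1 r.2 hq S).mpr hv
        rcases hval with ⟨h1, h2⟩ | ⟨h1, h2⟩
        · exact ⟨p, hp, Or.inl (Or.inl ⟨h1, h2⟩)⟩
        · exact ⟨p, hp, Or.inl (Or.inr ⟨h1, h2⟩)⟩
      · obtain ⟨p, hp, hval⟩ := ih'.mpr ⟨r, hr, hv⟩
        exact ⟨p, hp, Or.inr hval⟩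

-- ===== VERDICT (by name: the statement is the Claim_ definition above) =====
theorem has_dangerous_interaction_py_spec : Claim_equal_has_dangerous_interaction_py := by
  intro drug_name concomitant _
  unfold Spec_has_dangerous_interaction_py has_dangerous_interaction_py has_dangerous_interaction_py_alt
  by_cases hc : concomitant = []
  · simp [hc]
  · simp only [if_neg hc]
    set S : List String := PySem.Set.union (PySem.Set.ofList [drug_name]) concomitant with hS
    set R : List String := PySem.Set.inter S pvVocab with hR
    rw [Bool.eq_iff_iff]
    rw [show (pvCombos2 R).any (fun p => pvFrozenMem p.1 p.2)
          = (pvCombos2 R).any (fun p => pvDangerousFS.any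
              (fun q => (p.1 == q.1 && p.2 == q.2) || (p.1 == q.2 && p.2 == q.1))) from rfl]
    rw [pvGen pvDangerousFS (by decide) R]
    simp [pvDangerousPairsA, pvDangerousFS, PySem.Set.issubset_iff, hR,
      PySem.Set.mem_inter, pvVocab]
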